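-- pv_equiv track=rewrite | github.com/dimiarbre/decentralizepy_grid5000 | utils.py | add_times
-- ===== SOURCE A (Python) =====
-- def parse(h):
--     res = h.split(":")
--     return [int(e) for e in res]
--
-- def to_hours(l):
--     res = [str(e) for e in l]
--     res = ["0" + e if len(e) == 1 else e for e in res]
--     return ":".join(res)
--
-- def add_times(h1, h2):
--     h1_parsed = parse(h1)
--     h2_parsed = parse(h2)
--
--     assert len(h1_parsed) == len(h2_parsed)
--
--     res = []
--     s = 0
--     for i in range(len(h1_parsed) - 1, -1, -1):
--         s += h1_parsed[i] + h2_parsed[i]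
--         if i > 0:
--             res.append(s % 60)
--             s = s // 60
--         else:
--             res.append(s)
--     return to_hours(res[::-1])
-- ===== SOURCE B (Python) =====
-- def parse(h):
--     res = h.split(":")
--     return [int(e) for e in res]
--
-- def to_hours(l):
--     res = [str(e) for e in l]
--     res = ["0" + e if len(e) == 1 else e for e in res]
--     return ":".join(res)
--
-- def add_times(h1, h2):
--     a = parse(h1)
--     b = parse(h2)
--     assert len(a) == len(b)
--     total = 0
--     for x, y in zip(a, b):
--         total = total * 60 + x + y
--     parts = []
--     for _ in range(len(a) - 1):
--         r = total % 60
--         total = total // 60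
--         parts.append(r)
--     parts.append(total)
--     return to_hours(parts[::-1])
-- ===== Notes on version B (the rewrite author's own statement) =====
-- stated objective: alternative
-- what changed: Replaces A's right-to-left index loop that carries and emits a digit per position with a Horner fold of each parsed list into one base-60 integer, a single addition, and a divmod loop that re-expands the sum into the same number of components.
import Mathlib
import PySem

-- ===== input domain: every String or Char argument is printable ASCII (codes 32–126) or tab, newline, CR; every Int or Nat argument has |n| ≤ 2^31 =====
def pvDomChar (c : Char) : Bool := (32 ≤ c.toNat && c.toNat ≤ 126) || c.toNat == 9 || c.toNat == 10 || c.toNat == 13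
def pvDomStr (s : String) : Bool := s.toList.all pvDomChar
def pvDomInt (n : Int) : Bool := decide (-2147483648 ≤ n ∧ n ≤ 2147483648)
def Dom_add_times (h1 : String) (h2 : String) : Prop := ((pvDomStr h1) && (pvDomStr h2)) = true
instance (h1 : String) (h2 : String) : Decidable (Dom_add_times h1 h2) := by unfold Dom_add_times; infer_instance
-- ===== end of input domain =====

-- B replaces A's right-to-left carry loop by a Horner fold to one integer plus a divmod
-- re-expansion (objective: alternative, same asymptotic cost).


-- ===== PORT A =====
-- shared helpers = the module's own helpers `parse` and `to_hours` (identical in Source A and Source B)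
-- parse: int(e) for e in h.split(":"); `none` exactly where Python raises ValueError
def parsePy (h : String) : Option (List Int) :=
  (PySem.Chars.splitOn h.toList [':']).mapM PySem.Int.ofChars?

-- to_hours: str each component, zero-pad the length-1 ones, join with ":"
def toHours (l : List Int) : String :=
  String.ofList (PySem.Chars.join [':'] (l.map (fun e =>
    let cs := PySem.Int.toChars e
    if cs.length = 1 then '0' :: cs else cs)))

-- A: carry loop over indices len-1 … 0 (the '' fallbacks are where Python raises; excluded by Pre_)
def add_times (h1 : String) (h2 : String) : String :=
  match parsePy h1, parsePy h2 with
  | some p1, some p2 =>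
    if p1.length = p2.length then
      let st := (PySem.List.pyRange ((p1.length : Int) - 1) (-1) (-1)).foldl
        (fun (st : List Int × Int) i =>
          let s := st.2 + PySem.List.pyGetD p1 i 0 + PySem.List.pyGetD p2 i 0
          if 0 < i then (st.1 ++ [PySem.Int.mod s 60], PySem.Int.floordiv s 60)
          else (st.1 ++ [s], s))
        (([] : List Int), (0 : Int))
      toHours st.1.reverse
    else ""
  | _, _ => ""

-- ===== PORT B =====
-- Source B's own copies of the helpers `parse` and `to_hours` (same text as in Source A)
def parsePyB (h : String) : Option (List Int) :=
  (PySem.Chars.splitOn h.toList [':']).mapM PySem.Int.ofChars?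

def toHoursB (l : List Int) : String :=
  String.ofList (PySem.Chars.join [':'] (l.map (fun e =>
    let cs := PySem.Int.toChars e
    if cs.length = 1 then '0' :: cs else cs)))

-- the divmod re-expansion loop: k remainders bottom-up, then the leftover quotient
def extractDigits : Nat → Int → List Int
  | 0, t => [t]
  | k + 1, t => PySem.Int.mod t 60 :: extractDigits k (PySem.Int.floordiv t 60)

-- B: Horner fold to a single base-60 integer, then re-expand with divmod
def add_times_alt (h1 : String) (h2 : String) : String :=
  match (parsePyB h1, parsePyB h2) with
  | (some p1, some p2) =>
    if p1.length = p2.length then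
      let total := (p1.zip p2).foldl (fun t xy => t * 60 + xy.1 + xy.2) 0
      toHoursB (extractDigits (p1.length - 1) total).reverse
    else ""
  | (some _, none) => ""
  | (none, some _) => ""
  | (none, none) => ""

-- ===== PRECONDITION & SPEC =====
-- Pre_ excludes exactly the inputs where Python A raises: a component int() cannot parse
-- (ValueError) or the two strings have different component counts (AssertionError).
def Pre_add_times (h1 : String) (h2 : String) : Prop :=
  (∀ e ∈ PySem.Chars.splitOn h1.toList [':'], (PySem.Int.ofChars? e).isSome) ∧
  (∀ e ∈ PySem.Chars.splitOn h2.toList [':'], (PySem.Int.ofChars? e).isSome) ∧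
  (PySem.Chars.splitOn h1.toList [':']).length = (PySem.Chars.splitOn h2.toList [':']).length
instance (h1 : String) (h2 : String) : Decidable (Pre_add_times h1 h2) := by
  unfold Pre_add_times; infer_instance

def pvWitness_add_times : String × String := ("01:30", "02:45")

def Spec_add_times (h1 : String) (h2 : String) (out : String) : Prop := out = add_times_alt h1 h2
instance (h1 : String) (h2 : String) (out : String) : Decidable (Spec_add_times h1 h2 out) := by
  unfold Spec_add_times; infer_instance

-- ===== CLAIM (what is proved, stated in full; the proofs are below) =====
def Claim_equal_add_times : Prop := ∀ (h1 : String) (h2 : String), Dom_add_times h1 h2 → Pre_add_times h1 h2 → Spec_add_times h1 h2 (add_times h1 h2)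

-- ===== LEMMAS AND PROOFS =====

-- A's loop, abstracted: one list of per-position sums, processed bottom-up
def carryRun : List Int → Int → List Int
  | [], _ => []
  | [x], s => [s + x]
  | x :: y :: ys, s =>
      PySem.Int.mod (s + x) 60 :: carryRun (y :: ys) (PySem.Int.floordiv (s + x) 60)

-- value of a reversed (bottom-first) digit list in base 60
def hornerRev : List Int → Int
  | [] => 0
  | x :: xs => x + 60 * hornerRev xs

lemma carryRun_eq_extract (rs : List Int) (hne : rs ≠ []) (s : Int) :
    carryRun rs s = extractDigits (rs.length - 1) (s + hornerRev rs) := by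
  induction rs generalizing s with
  | nil => exact absurd rfl hne
  | cons x xs ih =>
    cases xs with
    | nil => simp [carryRun, hornerRev, extractDigits]
    | cons y ys =>
      have h60 : (0:Int) < 60 := by norm_num
      have hH : s + hornerRev (x :: y :: ys) = (s + x) + hornerRev (y :: ys) * 60 := by
        simp [hornerRev]; ring
      have hlen : (x :: y :: ys).length - 1 = ys.length + 1 := rfl
      rw [hH, hlen]
      show PySem.Int.mod (s + x) 60 :: carryRun (y :: ys) (PySem.Int.floordiv (s + x) 60)
        = extractDigits (ys.length + 1) (s + x + hornerRev (y :: ys) * 60)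
      show _ = PySem.Int.mod (s + x + hornerRev (y :: ys) * 60) 60
        :: extractDigits ys.length (PySem.Int.floordiv (s + x + hornerRev (y :: ys) * 60) 60)
      have hmod : PySem.Int.mod (s + x + hornerRev (y :: ys) * 60) 60 = PySem.Int.mod (s + x) 60 := by
        rw [PySem.Int.mod_eq_emod_of_pos h60, PySem.Int.mod_eq_emod_of_pos h60]
        omega
      have hdiv : PySem.Int.floordiv (s + x + hornerRev (y :: ys) * 60) 60
          = PySem.Int.floordiv (s + x) 60 + hornerRev (y :: ys) := by
        rw [PySem.Int.floordiv_eq_ediv_of_pos h60, PySem.Int.floordiv_eq_ediv_of_pos h60,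
          Int.add_mul_ediv_right _ _ (by norm_num : (60:Int) ≠ 0)]
      rw [hmod, hdiv, ih (by simp)]
      rfl

-- A's foldl over the descending index range, characterised as carryRun on the reversed list
lemma loopA_char (ps : List Int) (acc : List Int) (s : Int) :
    ((PySem.List.pyRange ((ps.length : Int) - 1) (-1) (-1)).foldl
      (fun (st : List Int × Int) i =>
        let t := st.2 + PySem.List.pyGetD ps i 0
        if 0 < i then (st.1 ++ [PySem.Int.mod t 60], PySem.Int.floordiv t 60)
        else (st.1 ++ [t], t))
      (acc, s)).1 = acc ++ carryRun ps.reverse s := by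
  induction ps using List.reverseRecOn generalizing acc s with
  | nil =>
      rw [PySem.List.pyRange_neg_one_eq_nil (by norm_num)]
      simp [carryRun]
  | append_singleton qs x ih =>
      have hlen : ((qs ++ [x]).length : Int) - 1 = (qs.length : Int) := by
        simp
      rw [hlen, PySem.List.pyRange_neg_one_cons (by omega)]
      simp only [List.foldl_cons]
      have hget : PySem.List.pyGetD (qs ++ [x]) (qs.length : Int) 0 = x := by
        rw [PySem.List.pyGetD_natCast]
        simp
      have hcongr : ∀ (init : List Int × Int),
          ((PySem.List.pyRange ((qs.length : Int) - 1) (-1) (-1)).foldl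
            (fun (st : List Int × Int) i =>
              let t := st.2 + PySem.List.pyGetD (qs ++ [x]) i 0
              if 0 < i then (st.1 ++ [PySem.Int.mod t 60], PySem.Int.floordiv t 60)
              else (st.1 ++ [t], t)) init)
          = ((PySem.List.pyRange ((qs.length : Int) - 1) (-1) (-1)).foldl
            (fun (st : List Int × Int) i =>
              let t := st.2 + PySem.List.pyGetD qs i 0
              if 0 < i then (st.1 ++ [PySem.Int.mod t 60], PySem.Int.floordiv t 60)
              else (st.1 ++ [t], t)) init) := by
        intro init
        apply PySem.List.foldl_congr_mem
        intro st i hi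
        have hib := (PySem.List.mem_pyRange_neg_one).1 hi
        have h0 : 0 ≤ i := by omega
        have hilt : i < (qs.length : Int) := by omega
        have : PySem.List.pyGetD (qs ++ [x]) i 0 = PySem.List.pyGetD qs i 0 := by
          rw [PySem.List.pyGetD_eq_getElem (qs ++ [x]) 0 h0 (by simp; omega),
              PySem.List.pyGetD_eq_getElem qs 0 h0 (by exact_mod_cast hilt)]
          rw [List.getElem_append_left]
        simp only [this]
      cases qs with
      | nil =>
          simp only [List.length_nil, Nat.cast_zero] at hget ⊢
          rw [hget]
          simp only [lt_irrefl, if_false]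
          rw [PySem.List.pyRange_neg_one_eq_nil (by norm_num)]
          simp [carryRun]
      | cons q qs' =>
          have hpos : (0:Int) < ((q :: qs').length : Int) := by exact_mod_cast Nat.succ_pos _
          rw [hget]
          simp only [if_pos hpos]
          rw [hcongr, ih]
          have : (q :: qs' ++ [x]).reverse = x :: (q :: qs').reverse := by simp
          rw [this]
          have hne : (q :: qs').reverse ≠ [] := by simp
          cases hrev : (q :: qs').reverse with
          | nil => exact absurd hrev hne
          | cons r rs =>
              simp [carryRun]

-- the two per-position sums collapse into one zipWith list inside A's loop body
lemma loopA_two_lists (p1 p2 : List Int) (hlen : p1.length = p2.length)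
    (acc : List Int) (s : Int) :
    ((PySem.List.pyRange ((p1.length : Int) - 1) (-1) (-1)).foldl
      (fun (st : List Int × Int) i =>
        let t := st.2 + PySem.List.pyGetD p1 i 0 + PySem.List.pyGetD p2 i 0
        if 0 < i then (st.1 ++ [PySem.Int.mod t 60], PySem.Int.floordiv t 60)
        else (st.1 ++ [t], t))
      (acc, s))
    = ((PySem.List.pyRange (((p1.zipWith (· + ·) p2).length : Int) - 1) (-1) (-1)).foldl
      (fun (st : List Int × Int) i =>
        let t := st.2 + PySem.List.pyGetD (p1.zipWith (· + ·) p2) i 0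
        if 0 < i then (st.1 ++ [PySem.Int.mod t 60], PySem.Int.floordiv t 60)
        else (st.1 ++ [t], t))
      (acc, s)) := by
  have hzlen : (p1.zipWith (· + ·) p2).length = p1.length := by
    simp [List.length_zipWith, hlen]
  rw [hzlen]
  apply PySem.List.foldl_congr_mem
  intro st i hi
  have hib := (PySem.List.mem_pyRange_neg_one).1 hi
  have h0 : 0 ≤ i := by omega
  have h1 : i < (p1.length : Int) := by omega
  have h2 : i < (p2.length : Int) := by omega
  have hz : i < ((p1.zipWith (· + ·) p2).length : Int) := by rw [hzlen]; omega
  rw [PySem.List.pyGetD_eq_getElem p1 0 h0 h1,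
      PySem.List.pyGetD_eq_getElem p2 0 h0 h2,
      PySem.List.pyGetD_eq_getElem (p1.zipWith (· + ·) p2) 0 h0 hz]
  simp only [List.getElem_zipWith, add_assoc]

-- B's Horner fold over the zipped pairs computes hornerRev of the reversed sum list
lemma horner_zip (p1 p2 : List Int) (t : Int) :
    (p1.zip p2).foldl (fun t xy => t * 60 + xy.1 + xy.2) t
      = (p1.zipWith (· + ·) p2).foldl (fun t x => t * 60 + x) t := by
  induction p1 generalizing p2 t with
  | nil => simp
  | cons x xs ih =>
      cases p2 with
      | nil => simp
      | cons y ys =>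
          simp only [List.zip_cons_cons, List.zipWith_cons_cons, List.foldl_cons]
          rw [ih]
          congr 1
          ring

lemma hornerRev_reverse (l : List Int) (t : Int) :
    l.foldl (fun t x => t * 60 + x) t = hornerRev l.reverse + t * 60 ^ l.length := by
  induction l generalizing t with
  | nil => simp [hornerRev]
  | cons x xs ih =>
      simp only [List.foldl_cons, List.reverse_cons, List.length_cons]
      rw [ih]
      have : hornerRev (xs.reverse ++ [x]) = hornerRev xs.reverse + x * 60 ^ xs.reverse.length := by
        clear ih
        induction xs.reverse with
        | nil => simp [hornerRev]
        | cons a as iha => simp [hornerRev, iha]; ring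
      rw [this]
      simp [List.length_reverse]
      ring

-- the inner computations of the two ports agree
lemma core_eq (p1 p2 : List Int) (hlen : p1.length = p2.length) (hne : p1 ≠ []) :
    ((PySem.List.pyRange ((p1.length : Int) - 1) (-1) (-1)).foldl
      (fun (st : List Int × Int) i =>
        let s := st.2 + PySem.List.pyGetD p1 i 0 + PySem.List.pyGetD p2 i 0
        if 0 < i then (st.1 ++ [PySem.Int.mod s 60], PySem.Int.floordiv s 60)
        else (st.1 ++ [s], s))
      (([] : List Int), (0 : Int))).1
    = extractDigits (p1.length - 1) ((p1.zip p2).foldl (fun t xy => t * 60 + xy.1 + xy.2) 0) := by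
  have hzlen : (p1.zipWith (· + ·) p2).length = p1.length := by
    simp [List.length_zipWith, hlen]
  have hzne : (p1.zipWith (· + ·) p2) ≠ [] := by
    intro h
    rw [h] at hzlen
    exact hne (List.length_eq_zero_iff.1 hzlen.symm)
  rw [loopA_two_lists p1 p2 hlen, loopA_char]
  have hrne : (p1.zipWith (· + ·) p2).reverse ≠ [] := by simp [hzne]
  rw [carryRun_eq_extract _ hrne 0]
  rw [horner_zip, hornerRev_reverse]
  simp [hzlen]

-- Python's str.split always returns at least one piece: the go-loop of splitOn never yields []
lemma splitOn_go_ne_nil (sep : List Char) : ∀ (fuel : Nat) (s cur : List Char)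
    (acc : List (List Char)), PySem.Chars.splitOn.go sep fuel s cur acc ≠ [] := by
  intro fuel
  induction fuel with
  | zero => intro s cur acc; simp [PySem.Chars.splitOn.go]
  | succ f ih =>
    intro s cur acc
    cases s with
    | nil => simp [PySem.Chars.splitOn.go]
    | cons c rest =>
      rw [PySem.Chars.splitOn.go]
      split_ifs <;> apply ih

lemma splitOn_ne_nil (s sep : List Char) : PySem.Chars.splitOn s sep ≠ [] :=
  splitOn_go_ne_nil sep _ s [] []

lemma mapM_ne_nil {α β : Type} (l : List α) (f : α → Option β) (r : List β)
    (hl : l ≠ []) (h : l.mapM f = some r) : r ≠ [] := by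
  cases l with
  | nil => exact absurd rfl hl
  | cons x xs =>
    rw [List.mapM_cons] at h
    cases hfx : f x with
    | none => rw [hfx] at h; simp at h
    | some b =>
      rw [hfx] at h
      cases hxs : xs.mapM f with
      | none => rw [hxs] at h; simp at h
      | some rs =>
        rw [hxs] at h
        simp at h
        rw [← h]
        simp

lemma parsePyB_eq (h : String) : parsePyB h = parsePy h := rfl

lemma toHoursB_eq (l : List Int) : toHoursB l = toHours l := rfl

lemma parsePy_ne_nil (h : String) (p : List Int) (hp : parsePy h = some p) : p ≠ [] :=
  mapM_ne_nil _ _ _ (splitOn_ne_nil h.toList [':']) hp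

-- ===== VERDICT (by name: the statement is the Claim_ definition above) =====
theorem add_times_spec : Claim_equal_add_times := by
  intro h1 h2 _ _
  unfold Spec_add_times add_times add_times_alt
  rw [parsePyB_eq, parsePyB_eq]
  cases hp1 : parsePy h1 with
  | none => cases parsePy h2 <;> rfl  -- both fallbacks are ""

  | some p1 =>
    cases hp2 : parsePy h2 with
    | none => rfl
    | some p2 =>
      by_cases hlen : p1.length = p2.length
      · simp only [if_pos hlen]
        rw [toHoursB_eq, core_eq p1 p2 hlen (parsePy_ne_nil h1 p1 hp1)]
      · simp only [if_neg hlen]
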